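-- pv_equiv track=rewrite | github.com/Fairblock/dkg-protocol-testing | extractkey.py | extract_addresses
-- ===== SOURCE A (Python) =====
-- def extract_addresses(output):
--
--     addresses = []
--     lines = output.split('\n')
--     skip_next = False
--     for line in lines:
--         if skip_next:
--             skip_next = False
--             addresses.append(line.strip())
--         if line.startswith('- address:'):
--             skip_next = True
--     return addresses
-- ===== SOURCE B (Python) =====
-- def extract_addresses(output):
--     lines = output.split('\n')
--     return [nxt.strip() for cur, nxt in zip(lines, lines[1:])
--             if cur.startswith('- address:')]
-- ===== Notes on version B (the rewrite author's own statement) =====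
-- stated objective: idiomatic
-- what changed: Replaces the one-step-delayed skip_next boolean state machine with a stateless comprehension over adjacent line pairs (zip(lines, lines[1:])).
import Mathlib
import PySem

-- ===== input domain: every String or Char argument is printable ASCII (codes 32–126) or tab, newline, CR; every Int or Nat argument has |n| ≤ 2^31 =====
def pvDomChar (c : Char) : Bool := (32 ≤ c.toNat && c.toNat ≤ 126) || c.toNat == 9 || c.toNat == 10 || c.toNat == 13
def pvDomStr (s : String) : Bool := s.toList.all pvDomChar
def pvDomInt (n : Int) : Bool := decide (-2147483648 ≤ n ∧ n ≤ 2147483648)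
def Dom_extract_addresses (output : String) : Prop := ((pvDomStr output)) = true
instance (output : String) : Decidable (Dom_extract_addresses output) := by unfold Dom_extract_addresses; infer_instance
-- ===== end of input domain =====

-- ===== PORT A =====
-- A: state machine with a skip_next flag carried through a fold over the lines.
-- pvStep is one iteration of A's loop body (append-if-skipping, then set the flag).
def pvStep (st : List String × Bool) (line : String) : List String × Bool :=
  let st := if st.2 then (st.1 ++ [PySem.Str.strip line], false) else st
  if PySem.Str.startswith line "- address:" then (st.1, true) else st

def extract_addresses (output : String) : List String :=
  let lines := (PySem.Str.split? output "\n").getD []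
  (lines.foldl pvStep ([], false)).1

-- ===== PORT B =====
-- B: stateless comprehension over adjacent line pairs (zip lines lines.tail).
def extract_addresses_alt (output : String) : List String :=
  let lines := (PySem.Str.split? output "\n").getD []
  (lines.zip lines.tail).filterMap
    (fun p => if PySem.Str.startswith p.1 "- address:" then some (PySem.Str.strip p.2) else none)

-- ===== PRECONDITION & SPEC =====
def Spec_extract_addresses (output : String) (out : List String) : Prop := out = extract_addresses_alt output
instance (output : String) (out : List String) : Decidable (Spec_extract_addresses output out) := by unfold Spec_extract_addresses; infer_instance

-- ===== CLAIM (what is proved, stated in full; the proofs are below) =====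
def Claim_equal_extract_addresses : Prop := ∀ (output : String), Dom_extract_addresses output → Spec_extract_addresses output (extract_addresses output)

-- ===== LEMMAS AND PROOFS =====

theorem pvStep_eq (acc : List String) (skip : Bool) (x : String) :
    pvStep (acc, skip) x =
      ((if skip then acc ++ [PySem.Str.strip x] else acc),
       PySem.Str.startswith x "- address:") := by
  cases skip <;> cases hx : PySem.Str.startswith x "- address:" <;>
    simp [pvStep] <;> simp at hx <;> simp [hx]

theorem pv_main (l : List String) (acc : List String) (skip : Bool) :
    (l.foldl pvStep (acc, skip)).1 =
    acc ++ (if skip then (l.head?.map PySem.Str.strip).toList else [])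
        ++ (l.zip l.tail).filterMap
            (fun p => if PySem.Str.startswith p.1 "- address:" then some (PySem.Str.strip p.2) else none) := by
  induction l generalizing acc skip with
  | nil => cases skip <;> simp
  | cons x xs ih =>
    rw [List.foldl_cons, pvStep_eq, ih]
    cases xs with
    | nil =>
      cases skip <;> cases PySem.Str.startswith x "- address:" <;> simp
    | cons y ys =>
      cases skip <;> cases hx : PySem.Str.startswith x "- address:" <;>
        simp at hx ⊢ <;> simp [hx]

-- ===== VERDICT (by name: the statement is the Claim_ definition above) =====
theorem extract_addresses_spec : Claim_equal_extract_addresses := by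
  intro output _
  unfold Spec_extract_addresses extract_addresses extract_addresses_alt
  simp [pv_main]
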